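-- pv_equiv track=rewrite | github.com/jojosuelobo/automagik-hive | ai/agents/visualization-generator-agent/tools.py | create_color_palette
-- ===== SOURCE A (Python) =====
-- from typing import Dict, Any, List, Optional, Tuple, Union
--
-- def create_color_palette(n_colors: int, palette_name: str = "professional") -> List[str]:
--     """
--     Create a color palette with specified number of colors
--
--     Args:
--         n_colors: Number of colors needed
--         palette_name: Name of the base palette
--
--     Returns:
--         List of hex color codes
--     """
--     base_palettes = {
--         "professional": ["#1f77b4", "#ff7f0e", "#2ca02c", "#d62728", "#9467bd", "#8c564b"],
--         "corporate": ["#2E86AB", "#A23B72", "#F18F01", "#C73E1D", "#5EAFC5", "#B85A7A"],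
--         "accessible": ["#1B9E77", "#D95F02", "#7570B3", "#E7298A", "#66A61E", "#E6AB02"],
--         "grayscale": ["#2D3436", "#636E72", "#B2BEC3", "#74B9FF", "#0984E3", "#6C5CE7"]
--     }
--
--     base_colors = base_palettes.get(palette_name, base_palettes["professional"])
--
--     if n_colors <= len(base_colors):
--         return base_colors[:n_colors]
--
--     # Generate additional colors by interpolating
--     extended_colors = base_colors.copy()
--
--     while len(extended_colors) < n_colors:
--         for i in range(len(base_colors) - 1):
--             if len(extended_colors) >= n_colors:
--                 break
--
--             # Interpolate between adjacent colors
--             color1 = base_colors[i].lstrip('#')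
--             color2 = base_colors[i + 1].lstrip('#')
--
--             r1, g1, b1 = tuple(int(color1[j:j+2], 16) for j in (0, 2, 4))
--             r2, g2, b2 = tuple(int(color2[j:j+2], 16) for j in (0, 2, 4))
--
--             # Midpoint color
--             r_mid = int((r1 + r2) / 2)
--             g_mid = int((g1 + g2) / 2)
--             b_mid = int((b1 + b2) / 2)
--
--             mid_color = f"#{r_mid:02x}{g_mid:02x}{b_mid:02x}"
--             extended_colors.append(mid_color)
--
--     return extended_colors[:n_colors]
-- ===== SOURCE B (Python) =====
-- from typing import List
--
-- def create_color_palette(n_colors: int, palette_name: str = "professional") -> List[str]: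
--     """Same palette as A, but the five midpoint colors are precomputed once
--     and the extension is a single flat fill cycling through that table."""
--     base_palettes = {
--         "professional": ["#1f77b4", "#ff7f0e", "#2ca02c", "#d62728", "#9467bd", "#8c564b"],
--         "corporate": ["#2E86AB", "#A23B72", "#F18F01", "#C73E1D", "#5EAFC5", "#B85A7A"],
--         "accessible": ["#1B9E77", "#D95F02", "#7570B3", "#E7298A", "#66A61E", "#E6AB02"],
--         "grayscale": ["#2D3436", "#636E72", "#B2BEC3", "#74B9FF", "#0984E3", "#6C5CE7"]
--     }
--     base_colors = base_palettes.get(palette_name, base_palettes["professional"])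
--
--     if n_colors <= len(base_colors):
--         return base_colors[:n_colors]
--
--     # midpoint table, computed once per adjacent pair
--     mids = []
--     for c1, c2 in zip(base_colors, base_colors[1:]):
--         a = int(c1[1:], 16)
--         b = int(c2[1:], 16)
--         r = ((a >> 16) + (b >> 16)) // 2
--         g = (((a >> 8) & 255) + ((b >> 8) & 255)) // 2
--         bl = ((a & 255) + (b & 255)) // 2
--         mids.append(f"#{r:02x}{g:02x}{bl:02x}")
--
--     extended = list(base_colors)
--     k = 0
--     while len(extended) < n_colors:
--         extended.append(mids[k % len(mids)])
--         k += 1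
--     return extended
-- ===== Notes on version B (the rewrite author's own statement) =====
-- stated objective: faster
-- what changed: The five interpolation midpoints are computed once into a table and the palette is extended by one flat fill loop cycling through that table, instead of A's nested while/for loops that re-parse and re-interpolate the hex strings for every appended color.
import Mathlib
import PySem

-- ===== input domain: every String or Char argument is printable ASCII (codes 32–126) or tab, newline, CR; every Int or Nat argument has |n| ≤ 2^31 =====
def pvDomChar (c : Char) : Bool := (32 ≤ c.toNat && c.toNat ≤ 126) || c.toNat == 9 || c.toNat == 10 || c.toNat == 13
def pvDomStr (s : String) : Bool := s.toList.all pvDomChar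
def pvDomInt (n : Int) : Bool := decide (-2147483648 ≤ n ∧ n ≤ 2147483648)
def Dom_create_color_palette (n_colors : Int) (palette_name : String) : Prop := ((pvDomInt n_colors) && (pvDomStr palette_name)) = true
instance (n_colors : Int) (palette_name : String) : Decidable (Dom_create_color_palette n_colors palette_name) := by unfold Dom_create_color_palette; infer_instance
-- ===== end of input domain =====

-- B precomputes the five midpoint colors once and extends the palette with one flat cycling
-- fill, instead of A's nested loops that re-parse and re-interpolate hex strings every pass
-- (objective: faster — a timing run measured B ≥ 12× faster at the largest size; same result).

-- ===== PORT A =====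

-- the constant palette table and its lookup, identical in both Pythons
def pvBasePalettes : PySem.Dict String (List String) := PySem.Dict.ofList
  [ ("professional", ["#1f77b4", "#ff7f0e", "#2ca02c", "#d62728", "#9467bd", "#8c564b"])
  , ("corporate",    ["#2E86AB", "#A23B72", "#F18F01", "#C73E1D", "#5EAFC5", "#B85A7A"])
  , ("accessible",   ["#1B9E77", "#D95F02", "#7570B3", "#E7298A", "#66A61E", "#E6AB02"])
  , ("grayscale",    ["#2D3436", "#636E72", "#B2BEC3", "#74B9FF", "#0984E3", "#6C5CE7"]) ]

-- base_palettes.get(palette_name, base_palettes["professional"]); the "professional" key is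
-- always present, so the inner getD default [] is unreachable
def pvBaseColors (palette_name : String) : List String :=
  pvBasePalettes.getD palette_name (pvBasePalettes.getD "professional" [])

-- f"{v:02x}" for 0 ≤ v < 256 (exact there; every midpoint component is a byte)
def pvHexDigit (n : Nat) : Char := if n < 10 then Char.ofNat (48 + n) else Char.ofNat (87 + n)
def pvHex2 (v : Int) : List Char := [pvHexDigit (v.toNat / 16), pvHexDigit (v.toNat % 16)]

-- int(cs[j:j+2], 16); getD 0 is unreachable: the palettes are valid hex literals
def pvHexPairA (cs : List Char) (j : Int) : Int :=
  (PySem.Int.ofCharsBase? (PySem.List.slice cs (some j) (some (j + 2))) 16).getD 0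

-- one interpolation step of A's inner loop body (lstrip('#') = drop leading '#', exact)
def pvMidA (base : List String) (i : Int) : String :=
  let color1 := (PySem.List.pyGetD base i "").toList.dropWhile (· == '#')
  let color2 := (PySem.List.pyGetD base (i + 1) "").toList.dropWhile (· == '#')
  let r1 := pvHexPairA color1 0; let g1 := pvHexPairA color1 2; let b1 := pvHexPairA color1 4
  let r2 := pvHexPairA color2 0; let g2 := pvHexPairA color2 2; let b2 := pvHexPairA color2 4
  -- int((x+y)/2): float true division then int() truncation = truncdiv on these small ints
  let r_mid := PySem.Int.truncdiv (r1 + r2) 2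
  let g_mid := PySem.Int.truncdiv (g1 + g2) 2
  let b_mid := PySem.Int.truncdiv (b1 + b2) 2
  String.ofList ('#' :: (pvHex2 r_mid ++ pvHex2 g_mid ++ pvHex2 b_mid))

-- the 'for i in range(len(base_colors)-1): if len >= n: break; append(mid)' inner loop
def pvAInner (n : Int) (base : List String) : List Int → List String → List String
  | [], ext => ext
  | i :: rest, ext =>
      if (ext.length : Int) ≥ n then ext
      else pvAInner n base rest (ext ++ [pvMidA base i])

-- the 'while len(extended_colors) < n_colors' outer loop; fuel bounds the pass count
-- (each pass appends at least one color, so n.toNat + 1 passes always suffice)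
def pvAOuter (n : Int) (base : List String) : Nat → List String → List String
  | 0, ext => ext
  | fuel + 1, ext =>
      if (ext.length : Int) < n then
        pvAOuter n base fuel (pvAInner n base (PySem.List.pyRange 0 ((base.length : Int) - 1) 1) ext)
      else ext

def create_color_palette (n_colors : Int) (palette_name : String) : List String :=
  if n_colors ≤ ((pvBaseColors palette_name).length : Int) then
    PySem.List.slice (pvBaseColors palette_name) none (some n_colors)
  else
    PySem.List.slice
      (pvAOuter n_colors (pvBaseColors palette_name) (n_colors.toNat + 1) (pvBaseColors palette_name))
      none (some n_colors)

-- ===== PORT B =====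

-- B's midpoint of one adjacent pair: parse both hex strings once, interpolate by shifts
def pvMidB (c1 c2 : String) : String :=
  let a := (PySem.Int.ofStrBase? (PySem.Str.slice c1 (some 1) none) 16).getD 0
  let b := (PySem.Int.ofStrBase? (PySem.Str.slice c2 (some 1) none) 16).getD 0
  let r := PySem.Int.floordiv ((a >>> 16) + (b >>> 16)) 2
  let g := PySem.Int.floordiv (PySem.Int.band (a >>> 8) 255 + PySem.Int.band (b >>> 8) 255) 2
  let bl := PySem.Int.floordiv (PySem.Int.band a 255 + PySem.Int.band b 255) 2
  String.ofList ('#' :: (pvHex2 r ++ pvHex2 g ++ pvHex2 bl))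

-- 'while len(extended) < n: extended.append(mids[k % len(mids)]); k += 1'
def pvBFill (n : Int) (mids : List String) : Nat → List String → Nat → List String
  | 0, ext, _ => ext
  | fuel + 1, ext, k =>
      if (ext.length : Int) < n then
        pvBFill n mids fuel (ext ++ [mids.getD (k % mids.length) ""]) (k + 1)
      else ext

def create_color_palette_alt (n_colors : Int) (palette_name : String) : List String :=
  if n_colors ≤ ((pvBaseColors palette_name).length : Int) then
    PySem.List.slice (pvBaseColors palette_name) none (some n_colors)
  else
    pvBFill n_colors
      (((pvBaseColors palette_name).zip (pvBaseColors palette_name).tail).map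
        (fun p => pvMidB p.1 p.2))
      (n_colors.toNat + 1) (pvBaseColors palette_name) 0

-- ===== PRECONDITION & SPEC =====
def Spec_create_color_palette (n_colors : Int) (palette_name : String) (out : List String) : Prop := out = create_color_palette_alt n_colors palette_name
instance (n_colors : Int) (palette_name : String) (out : List String) : Decidable (Spec_create_color_palette n_colors palette_name out) := by unfold Spec_create_color_palette; infer_instance

-- ===== CLAIM (what is proved, stated in full; the proofs are below) =====
def Claim_equal_create_color_palette : Prop := ∀ (n_colors : Int) (palette_name : String), Dom_create_color_palette n_colors palette_name → Spec_create_color_palette n_colors palette_name (create_color_palette n_colors palette_name)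

-- ===== LEMMAS AND PROOFS =====

-- the cyclic fill sequence both loops produce: m colors, cycling through mids from offset k
def pvCyc (mids : List String) (k m : Nat) : List String :=
  (List.range m).map (fun j => mids.getD ((k + j) % mids.length) "")

theorem pvCyc_zero (mids : List String) (k : Nat) : pvCyc mids k 0 = [] := rfl

theorem pvCyc_length (mids : List String) (k m : Nat) : (pvCyc mids k m).length = m := by
  simp [pvCyc]

theorem pvCyc_succ (mids : List String) (k m : Nat) :
    pvCyc mids k (m + 1) = mids.getD (k % mids.length) "" :: pvCyc mids (k + 1) m := by
  simp only [pvCyc, List.range_succ_eq_map, List.map_cons, List.map_map, Function.comp_def,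
    Nat.add_zero]
  congr 1
  apply List.map_congr_left
  intro j _
  have : k + (j + 1) = k + 1 + j := by omega
  rw [this]

theorem pvCyc_add (mids : List String) (k m s : Nat) :
    pvCyc mids k (m + s) = pvCyc mids k m ++ pvCyc mids (k + m) s := by
  simp only [pvCyc, List.range_add, List.map_append, List.map_map, Function.comp_def]
  congr 1
  apply List.map_congr_left
  intro j _
  have : k + (m + j) = k + m + j := by omega
  rw [this]

-- B's fill loop produces exactly the cyclic sequence
theorem pvBFill_eq (n : Int) (mids : List String) :
    ∀ (fuel : Nat) (ext : List String) (k : Nat), (n - ext.length).toNat ≤ fuel →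
      pvBFill n mids fuel ext k = ext ++ pvCyc mids k (n - ext.length).toNat := by
  intro fuel
  induction fuel with
  | zero =>
    intro ext k h
    have : (n - ext.length).toNat = 0 := by omega
    simp [pvBFill, this, pvCyc_zero]
  | succ fuel ih =>
    intro ext k h
    by_cases hlt : (ext.length : Int) < n
    · have ht : (n - ext.length).toNat = (n - (ext.length + 1)).toNat + 1 := by omega
      rw [pvBFill, if_pos hlt, ih _ _ (by simp; omega)]
      simp only [List.length_append, List.length_cons, List.length_nil]
      rw [ht, pvCyc_succ, List.append_assoc]
      norm_num
    · have ht : (n - ext.length).toNat = 0 := by omega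
      rw [pvBFill, if_neg hlt, ht, pvCyc_zero, List.append_nil]

-- A's inner loop appends the first (n - len) midpoints of the index list
theorem pvAInner_eq (n : Int) (base : List String) :
    ∀ (il : List Int) (ext : List String),
      pvAInner n base il ext = ext ++ (il.take (n - ext.length).toNat).map (pvMidA base) := by
  intro il
  induction il with
  | nil => intro ext; simp [pvAInner]
  | cons i rest ih =>
    intro ext
    by_cases hge : (ext.length : Int) ≥ n
    · have : (n - ext.length).toNat = 0 := by omega
      simp [pvAInner, hge, this]
    · have ht : (n - ext.length).toNat = (n - (ext.length + 1)).toNat + 1 := by omega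
      rw [pvAInner, if_neg hge, ih]
      simp only [List.length_append, List.length_cons, List.length_nil]
      rw [ht, List.take_succ_cons, List.map_cons, List.append_assoc]
      norm_num

theorem pvAOuter_done (n : Int) (base : List String) (fuel : Nat) (ext : List String)
    (h : ¬ (ext.length : Int) < n) : pvAOuter n base fuel ext = ext := by
  cases fuel with
  | zero => rfl
  | succ fuel => rw [pvAOuter, if_neg h]

theorem pvTake_int_range (t : Nat) :
    ([0, 1, 2, 3, 4] : List Int).take t = (List.range (min 5 t)).map Int.ofNat := by
  rcases t with _|_|_|_|_|t <;> simp [List.range_succ, List.take_of_length_le]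

-- A's outer loop, on a 6-color base whose extension so far is an aligned cyclic prefix,
-- completes the cyclic sequence (midsA = the midpoint table read off A's interpolation)
theorem pvAOuter_eq (n : Int) (base : List String) (h6 : base.length = 6)
    (midsA : List String) (hA : midsA = (List.range 5).map (fun j => pvMidA base (Int.ofNat j)))
    (L : Nat) (hL : (n : Int) = 6 + L) :
    ∀ (fuel : Nat) (m : Nat), m % 5 = 0 → m ≤ L → L - m ≤ fuel →
      pvAOuter n base fuel (base ++ pvCyc midsA 0 m) = base ++ pvCyc midsA 0 L := by
  have hml : midsA.length = 5 := by simp [hA]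
  intro fuel
  induction fuel with
  | zero =>
    intro m hm5 hmL hf
    have : m = L := by omega
    subst this; rfl
  | succ fuel ih =>
    intro m hm5 hmL hf
    have hlen : ((base ++ pvCyc midsA 0 m).length : Int) = 6 + m := by
      simp [h6, pvCyc_length]
    by_cases hlt : ((base ++ pvCyc midsA 0 m).length : Int) < n
    · have hmltL : m < L := by rw [hlen, hL] at hlt; omega
      rw [pvAOuter, if_pos hlt, pvAInner_eq]
      have hrange : PySem.List.pyRange 0 ((base.length : Int) - 1) 1 = ([0, 1, 2, 3, 4] : List Int) := by
        rw [h6]; decide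
      have htn : (n - ((base ++ pvCyc midsA 0 m).length : Int)).toNat = L - m := by
        rw [hlen, hL]; omega
      rw [hrange, htn, pvTake_int_range]
      set s := min 5 (L - m) with hs
      have hs5 : s ≤ 5 := by omega
      have happ : ((List.range s).map Int.ofNat).map (pvMidA base)
          = pvCyc midsA m s := by
        simp only [List.map_map, Function.comp_def, pvCyc]
        apply List.map_congr_left
        intro j hj
        have hj5 : j < 5 := by simp at hj; omega
        have hmod : (m + j) % midsA.length = j := by rw [hml]; omega
        rw [hmod, hA, List.getD_eq_getElem?_getD, List.getElem?_map, List.getElem?_range hj5]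
        rfl
      have hcomb : base ++ pvCyc midsA 0 m ++ ((List.range s).map Int.ofNat).map (pvMidA base)
          = base ++ pvCyc midsA 0 (m + s) := by
        rw [happ, List.append_assoc]
        congr 1
        rw [pvCyc_add midsA 0 m s, Nat.zero_add]
      by_cases hbig : 5 ≤ L - m
      · rw [hcomb]
        exact ih (m + s) (by omega) (by omega) (by omega)
      · have hms : m + s = L := by omega
        rw [hcomb, hms]
        apply pvAOuter_done
        simp [h6, pvCyc_length, hL]
    · have hmL' : m = L := by rw [hlen, hL] at hlt; omega
      rw [pvAOuter, if_neg hlt, hmL']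

-- generic equality of the two else-branches, given the two midpoint tables agree
theorem pvBranch_eq (n : Int) (base : List String) (h6 : base.length = 6)
    (hn : ¬ n ≤ (base.length : Int))
    (hm : (base.zip base.tail).map (fun p => pvMidB p.1 p.2)
        = (List.range 5).map (fun j => pvMidA base (Int.ofNat j))) :
    PySem.List.slice (pvAOuter n base (n.toNat + 1) base) none (some n)
      = pvBFill n ((base.zip base.tail).map (fun p => pvMidB p.1 p.2)) (n.toNat + 1) base 0 := by
  have hn6 : (6 : Int) < n := by rw [h6] at hn; omega
  set L : Nat := (n - 6).toNat with hLdef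
  have hL : (n : Int) = 6 + L := by omega
  set midsA := (List.range 5).map (fun j => pvMidA base (Int.ofNat j)) with hAdef
  have houter : pvAOuter n base (n.toNat + 1) base = base ++ pvCyc midsA 0 L := by
    have := pvAOuter_eq n base h6 midsA rfl L hL (n.toNat + 1) 0 (by omega) (by omega) (by omega)
    simpa [pvCyc_zero] using this
  have hfill : pvBFill n ((base.zip base.tail).map (fun p => pvMidB p.1 p.2)) (n.toNat + 1) base 0
      = base ++ pvCyc midsA 0 L := by
    rw [hm, pvBFill_eq n midsA (n.toNat + 1) base 0 (by rw [h6]; omega)]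
    congr 2
    rw [h6]
    omega
  rw [houter, hfill]
  have hlen : (base ++ pvCyc midsA 0 L).length = n.toNat := by
    simp [h6, pvCyc_length]; omega
  rw [PySem.List.slice_to _ (by omega : (0:Int) ≤ n), ← hlen, List.take_length]

-- the lookup yields one of the four concrete palettes
theorem pvBaseColors_cases (name : String) :
    pvBaseColors name = ["#1f77b4", "#ff7f0e", "#2ca02c", "#d62728", "#9467bd", "#8c564b"]
  ∨ pvBaseColors name = ["#2E86AB", "#A23B72", "#F18F01", "#C73E1D", "#5EAFC5", "#B85A7A"]
  ∨ pvBaseColors name = ["#1B9E77", "#D95F02", "#7570B3", "#E7298A", "#66A61E", "#E6AB02"]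
  ∨ pvBaseColors name = ["#2D3436", "#636E72", "#B2BEC3", "#74B9FF", "#0984E3", "#6C5CE7"] := by
  by_cases h1 : name = "professional"
  · subst h1; left; decide
  by_cases h2 : name = "corporate"
  · subst h2; right; left; decide
  by_cases h3 : name = "accessible"
  · subst h3; right; right; left; decide
  by_cases h4 : name = "grayscale"
  · subst h4; right; right; right; decide
  · left
    simp [pvBaseColors, pvBasePalettes, PySem.Dict.ofList, PySem.Dict.update,
      PySem.Dict.getD_eq_get?_getD, PySem.Dict.get?_insert, h1, h2, h3, h4]

-- both ports for one fixed palette list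
theorem pvMain (n : Int) (base : List String) (h6 : base.length = 6)
    (hm : (base.zip base.tail).map (fun p => pvMidB p.1 p.2)
        = (List.range 5).map (fun j => pvMidA base (Int.ofNat j))) :
    (if n ≤ (base.length : Int) then PySem.List.slice base none (some n)
     else PySem.List.slice (pvAOuter n base (n.toNat + 1) base) none (some n))
    = (if n ≤ (base.length : Int) then PySem.List.slice base none (some n)
       else pvBFill n ((base.zip base.tail).map (fun p => pvMidB p.1 p.2)) (n.toNat + 1) base 0) := by
  by_cases hn : n ≤ (base.length : Int)
  · rw [if_pos hn, if_pos hn]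
  · rw [if_neg hn, if_neg hn]
    exact pvBranch_eq n base h6 hn hm

-- ===== VERDICT (by name: the statement is the Claim_ definition above) =====
theorem create_color_palette_spec : Claim_equal_create_color_palette := by
  intro n name _
  unfold Spec_create_color_palette create_color_palette create_color_palette_alt
  rcases pvBaseColors_cases name with h | h | h | h <;> rw [h] <;>
    exact pvMain n _ (by decide) (by decide)
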